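-- pv_equiv track=rewrite | github.com/elduwa/shipp | app/policy_engine/policy_engine.py | transform_dataset
-- ===== SOURCE A (Python) =====
-- def transform_dataset(dataset: list):
--     client_to_domains = dict()
--     for datapoint in dataset:
--         client = datapoint[1]
--         domain = datapoint[3]
--         if client not in client_to_domains:
--             client_to_domains[client] = set()
--         client_to_domains[client].add(domain)
--     return client_to_domains
-- ===== SOURCE B (Python) =====
-- def transform_dataset(dataset: list):
--     clients = list(dict.fromkeys(datapoint[1] for datapoint in dataset))
--     return {c: {datapoint[3] for datapoint in dataset if datapoint[1] == c}
--             for c in clients}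
-- ===== Notes on version B (the rewrite author's own statement) =====
-- stated objective: alternative
-- what changed: Replaces A's single accumulating pass (dict of growing sets) with a two-phase build: first the distinct clients in first-occurrence order, then one dict comprehension that re-scans the dataset per client to collect its domains.
import Mathlib
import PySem

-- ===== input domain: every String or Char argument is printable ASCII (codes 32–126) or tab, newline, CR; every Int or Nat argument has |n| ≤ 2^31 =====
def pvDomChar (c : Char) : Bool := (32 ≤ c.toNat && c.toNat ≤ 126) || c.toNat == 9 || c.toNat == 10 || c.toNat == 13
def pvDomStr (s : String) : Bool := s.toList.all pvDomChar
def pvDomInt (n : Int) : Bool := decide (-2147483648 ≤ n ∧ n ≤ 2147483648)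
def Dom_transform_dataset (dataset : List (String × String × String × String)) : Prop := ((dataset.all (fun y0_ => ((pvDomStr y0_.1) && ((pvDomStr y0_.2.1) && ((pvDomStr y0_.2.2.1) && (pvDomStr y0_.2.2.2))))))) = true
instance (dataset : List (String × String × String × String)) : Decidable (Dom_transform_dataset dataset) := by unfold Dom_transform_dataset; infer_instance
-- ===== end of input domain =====

-- B builds the result in two phases (distinct clients first, then a per-client re-scan of the
-- dataset) instead of A's single accumulating pass; return values are identical, no side effects.

-- ===== PORT A =====
def transform_dataset (dataset : List (String × String × String × String)) : List (String × List String) :=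
  (dataset.foldl
    (fun client_to_domains datapoint =>
      let client := datapoint.2.1
      let domain := datapoint.2.2.2
      let d := if client_to_domains.contains client then client_to_domains
               else client_to_domains.insert client PySem.Set.empty
      d.modify client PySem.Set.empty (fun s => PySem.Set.add s domain))
    PySem.Dict.empty).items

-- ===== PORT B =====
def transform_dataset_alt (dataset : List (String × String × String × String)) : List (String × List String) :=
  let clients := PySem.List.dedup (dataset.map (fun datapoint => datapoint.2.1))
  clients.map (fun c =>
    (c, PySem.Set.ofList
          ((dataset.filter (fun datapoint => datapoint.2.1 == c)).map
            (fun datapoint => datapoint.2.2.2))))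

-- ===== PRECONDITION & SPEC =====
def Spec_transform_dataset (dataset : List (String × String × String × String)) (out : List (String × List String)) : Prop := out = transform_dataset_alt dataset
instance (dataset : List (String × String × String × String)) (out : List (String × List String)) : Decidable (Spec_transform_dataset dataset out) := by unfold Spec_transform_dataset; infer_instance

-- ===== CLAIM (what is proved, stated in full; the proofs are below) =====
def Claim_equal_transform_dataset : Prop := ∀ (dataset : List (String × String × String × String)), Dom_transform_dataset dataset → Spec_transform_dataset dataset (transform_dataset dataset)

-- ===== LEMMAS AND PROOFS =====

-- A's loop body (guarded insert of an empty set, then in-place add) is one overwrite-insert.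
theorem pv_step_eq (d : PySem.Dict String (PySem.Set String)) (c dom : String) :
    (let d' := if d.contains c then d else d.insert c PySem.Set.empty
     d'.modify c PySem.Set.empty (fun s => PySem.Set.add s dom))
    = d.insert c (PySem.Set.add (d.getD c PySem.Set.empty) dom) := by
  by_cases h : d.contains c = true
  · simp [h, PySem.Dict.modify]
  · rw [PySem.Dict.getD_of_not_contains d PySem.Set.empty (by simpa using h)]
    simp only [h, Bool.false_eq_true, if_false, PySem.Dict.modify,
      PySem.Dict.getD_insert_self, PySem.Dict.insert_insert_self]

-- the value of A's accumulator at key c, for an arbitrary starting dictionary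
theorem pv_getD_fold (c : String) :
    ∀ (l : List (String × String × String × String)) (d : PySem.Dict String (PySem.Set String)),
    (l.foldl (fun d dp => d.insert dp.2.1 (PySem.Set.add (d.getD dp.2.1 PySem.Set.empty) dp.2.2.2)) d).getD c PySem.Set.empty
      = PySem.Set.update (d.getD c PySem.Set.empty)
          ((l.filter (fun dp => dp.2.1 == c)).map (fun dp => dp.2.2.2)) := by
  intro l
  induction l with
  | nil => intro d; simp [PySem.Set.update]
  | cons dp rest ih =>
    intro d
    simp only [List.foldl_cons, ih, List.filter_cons]
    by_cases h : dp.2.1 = c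
    · subst h
      simp [PySem.Dict.getD_insert_self, PySem.Set.update]
    · rw [PySem.Dict.getD_insert_of_ne _ _ _ (fun he => h he.symm)]
      simp [beq_iff_eq, h]

theorem transform_dataset_eq (dataset : List (String × String × String × String)) :
    transform_dataset dataset = transform_dataset_alt dataset := by
  unfold transform_dataset transform_dataset_alt
  have hstep : dataset.foldl
      (fun client_to_domains datapoint =>
        let client := datapoint.2.1
        let domain := datapoint.2.2.2
        let d := if client_to_domains.contains client then client_to_domains
                 else client_to_domains.insert client PySem.Set.empty
        d.modify client PySem.Set.empty (fun s => PySem.Set.add s domain))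
      PySem.Dict.empty
      = dataset.foldl
        (fun d dp => d.insert dp.2.1 (PySem.Set.add (d.getD dp.2.1 PySem.Set.empty) dp.2.2.2))
        PySem.Dict.empty := by
    apply PySem.List.foldl_congr_mem
    intro d dp _
    exact pv_step_eq d dp.2.1 dp.2.2.2
  rw [hstep]
  have hnd : (dataset.foldl
      (fun d dp => d.insert dp.2.1 (PySem.Set.add (d.getD dp.2.1 PySem.Set.empty) dp.2.2.2))
      PySem.Dict.empty).keys.Nodup :=
    PySem.Dict.nodup_keys_foldl_insert_key dataset (fun dp => dp.2.1) _ _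
      PySem.Dict.nodup_keys_empty
  rw [PySem.Dict.items_eq_map_keys _ hnd PySem.Set.empty]
  have hkeys : (dataset.foldl
      (fun d dp => d.insert dp.2.1 (PySem.Set.add (d.getD dp.2.1 PySem.Set.empty) dp.2.2.2))
      PySem.Dict.empty).keys
      = PySem.List.dedup (dataset.map (fun dp => dp.2.1)) := by
    rw [PySem.Dict.keys_foldl_insert_key]
    simp [PySem.Dict.keys_empty, PySem.Set.update, PySem.Set.ofList_eq_foldl,
      PySem.List.dedup_eq_ofList]
  rw [hkeys]
  apply List.map_congr_left
  intro c _
  rw [pv_getD_fold c dataset PySem.Dict.empty]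
  simp [PySem.Dict.getD_empty, PySem.Set.update, PySem.Set.ofList_eq_foldl]

-- ===== VERDICT (by name: the statement is the Claim_ definition above) =====
theorem transform_dataset_spec : Claim_equal_transform_dataset := by
  intro dataset _
  unfold Spec_transform_dataset
  exact transform_dataset_eq dataset
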